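-- pv_equiv track=rewrite | github.com/scozzano/study-planner-with-AI | backend/src/recommender/spm_train.py | pattern_occurs_and_end_index
-- ===== SOURCE A (Python) =====
-- from typing import Dict, Any, List, Tuple, Iterable, Optional, Set
--
-- def pattern_occurs_and_end_index(pattern: List[str], seq_terms: List[List[str]]) -> Optional[int]:
--     if not pattern:
--         return -1
--     start = 0
--     for p in pattern:
--         found = False
--         for term_idx in range(start, len(seq_terms)):
--             if p in seq_terms[term_idx]:
--                 start = term_idx + 1
--                 found = True
--                 break
--         if not found:
--             return None
--     return start - 1
-- ===== SOURCE B (Python) =====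
-- def pattern_occurs_and_end_index(pattern, seq_terms):
--     if not pattern:
--         return -1
--     # Stage 1: build an index word -> ascending list of row indices (one per occurrence).
--     pairs = [(w, i) for i, term in enumerate(seq_terms) for w in term]
--     pos = {}
--     for w, i in pairs:
--         pos.setdefault(w, []).append(i)
--     # Stage 2: resolve each pattern element by a successor query (binary search).
--     end = -1
--     for p in pattern:
--         lst = pos.get(p, [])
--         lo, hi = 0, len(lst)
--         while lo < hi:  # first position with lst[mid] > end
--             mid = (lo + hi) // 2
--             if lst[mid] <= end:
--                 lo = mid + 1
--             else:
--                 hi = mid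
--         if lo == len(lst):
--             return None
--         end = lst[lo]
--     return end
-- ===== Notes on version B (the rewrite author's own statement) =====
-- stated objective: alternative
-- what changed: B first builds a word-to-ascending-row-indices index in one pass, then resolves each pattern element by a binary-search successor query on that index, instead of A's pattern-outer greedy scan over the rows.
import Mathlib
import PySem

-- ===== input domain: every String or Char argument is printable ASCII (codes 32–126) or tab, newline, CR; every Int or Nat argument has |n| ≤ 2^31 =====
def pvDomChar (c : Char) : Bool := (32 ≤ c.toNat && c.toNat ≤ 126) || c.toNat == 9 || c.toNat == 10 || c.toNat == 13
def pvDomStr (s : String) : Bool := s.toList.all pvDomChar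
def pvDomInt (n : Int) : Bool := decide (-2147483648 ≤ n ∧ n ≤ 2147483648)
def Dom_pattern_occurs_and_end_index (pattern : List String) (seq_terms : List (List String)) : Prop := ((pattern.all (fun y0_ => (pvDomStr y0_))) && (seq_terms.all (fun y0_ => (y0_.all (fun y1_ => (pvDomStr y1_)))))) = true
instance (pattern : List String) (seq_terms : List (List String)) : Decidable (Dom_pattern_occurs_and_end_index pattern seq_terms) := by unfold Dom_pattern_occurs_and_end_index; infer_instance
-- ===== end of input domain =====

-- B builds a word→ascending-row-indices index once and answers each pattern element by a
-- binary-search successor query on it, instead of A's pattern-outer greedy scan over rows;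
-- a different algorithm of similar cost ("alternative", not claimed faster).

-- ===== PORT A =====
-- inner loop: `for term_idx in range(start, len(seq_terms)): if p in seq_terms[term_idx]: …break`
def pvFindAGo (p : String) (seq : List (List String)) : Nat → Nat → Option Nat
  | 0, _ => none
  | rem + 1, i =>
    if h : i < seq.length then
      if p ∈ seq[i] then some (i + 1) else pvFindAGo p seq rem (i + 1)
    else none

def pvFindA (p : String) (seq : List (List String)) (i : Nat) : Option Nat :=
  pvFindAGo p seq (seq.length - i) i

-- outer loop: `for p in pattern`, carrying `start`; falls through to `return start - 1`
def pvGoA (pattern : List String) (seq : List (List String)) (start : Nat) : Option Int :=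
  match pattern with
  | [] => some ((start : Int) - 1)
  | p :: ps =>
    match pvFindA p seq start with
    | some s => pvGoA ps seq s
    | none => none

def pattern_occurs_and_end_index (pattern : List String) (seq_terms : List (List String)) : Option Int :=
  if pattern = [] then some (-1) else pvGoA pattern seq_terms 0

-- ===== PORT B =====
-- `pairs = [(w, i) for i, term in enumerate(seq_terms) for w in term]`
def pvPairsB (seq : List (List String)) : List (String × Int) :=
  (PySem.List.enumerate seq).flatMap (fun it => it.2.map (fun w => (w, it.1)))

-- `for w, i in pairs: pos.setdefault(w, []).append(i)`  (d[w] = d.get(w, []) ++ [i])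
def pvPosB (seq : List (List String)) : PySem.Dict String (List Int) :=
  (pvPairsB seq).foldl (fun d q => d.modify q.1 [] (· ++ [q.2])) PySem.Dict.empty

-- `while lo < hi: mid = (lo+hi)//2; if lst[mid] <= end: lo = mid+1 else: hi = mid`
-- exact: lo, hi are Nats so Python's // is Nat division, and lo ≤ mid < hi ≤ len(lst)
-- keeps lst[mid] in range, so getD never takes its default
def pvBisectGo (lst : List Int) (e : Int) : Nat → Nat → Nat → Nat
  | 0, lo, _ => lo
  | fuel + 1, lo, hi =>
    if lo < hi then
      let mid := (lo + hi) / 2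
      if lst.getD mid 0 ≤ e then pvBisectGo lst e fuel (mid + 1) hi
      else pvBisectGo lst e fuel lo mid
    else lo

def pvBisect (lst : List Int) (e : Int) (lo hi : Nat) : Nat :=
  pvBisectGo lst e (hi - lo) lo hi

-- `for p in pattern:` carrying `end`; falls through to `return end`
def pvGoB (pos : PySem.Dict String (List Int)) : List String → Int → Option Int
  | [], e => some e
  | p :: ps, e =>
    let lst := pos.getD p []
    let lo := pvBisect lst e 0 lst.length
    if lo = lst.length then none
    else pvGoB pos ps (lst.getD lo 0)

def pattern_occurs_and_end_index_alt (pattern : List String) (seq_terms : List (List String)) : Option Int :=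
  if pattern = [] then some (-1) else pvGoB (pvPosB seq_terms) pattern (-1)

-- ===== PRECONDITION & SPEC =====
def Spec_pattern_occurs_and_end_index (pattern : List String) (seq_terms : List (List String)) (out : Option Int) : Prop := out = pattern_occurs_and_end_index_alt pattern seq_terms
instance (pattern : List String) (seq_terms : List (List String)) (out : Option Int) : Decidable (Spec_pattern_occurs_and_end_index pattern seq_terms out) := by unfold Spec_pattern_occurs_and_end_index; infer_instance

-- ===== CLAIM (what is proved, stated in full; the proofs are below) =====
def Claim_equal_pattern_occurs_and_end_index : Prop := ∀ (pattern : List String) (seq_terms : List (List String)), Dom_pattern_occurs_and_end_index pattern seq_terms → Spec_pattern_occurs_and_end_index pattern seq_terms (pattern_occurs_and_end_index pattern seq_terms)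

-- ===== LEMMAS AND PROOFS =====

-- B's index, looked up at p, lists (in order) the second components of the matching pairs.
theorem posB_getD (seq : List (List String)) (p : String) :
    (pvPosB seq).getD p [] = ((pvPairsB seq).filter (fun q => q.1 == p)).map (·.2) := by
  unfold pvPosB
  rw [PySem.Dict.getD_foldl_modify_append]
  simp

-- membership: x is in the index at p iff x is a row index whose term-set contains p
theorem posB_mem (seq : List (List String)) (p : String) (x : Int) :
    x ∈ (pvPosB seq).getD p [] ↔ ∃ k : Nat, (∃ _ : k < seq.length, p ∈ seq[k]) ∧ (k : Int) = x := by
  rw [posB_getD]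
  simp [pvPairsB, List.mem_flatMap, PySem.List.mem_enumerate_iff]

theorem pairsB_pairwise_aux (l : List (Int × List String)) (h : l.Pairwise (fun a b => a.1 < b.1)) :
    (l.flatMap (fun it => it.2.map (fun w => (w, it.1)))).Pairwise (fun a b => a.2 ≤ b.2) := by
  induction l with
  | nil => simp
  | cons it rest ih =>
    rw [List.pairwise_cons] at h
    simp only [List.flatMap_cons]
    rw [List.pairwise_append]
    refine ⟨?_, ih h.2, ?_⟩
    · rw [List.pairwise_map]
      exact List.pairwise_iff_forall_sublist.mpr (fun _ => le_refl _)
    · intro x hx y hy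
      simp only [List.mem_map] at hx
      obtain ⟨w, _, rfl⟩ := hx
      simp only [List.mem_flatMap, List.mem_map] at hy
      obtain ⟨b, hb, w2, _, rfl⟩ := hy
      exact le_of_lt (h.1 b hb)

theorem posB_sorted (seq : List (List String)) (p : String) :
    ((pvPosB seq).getD p []).Pairwise (· ≤ ·) := by
  rw [posB_getD, List.pairwise_map]
  exact List.Pairwise.filter _ (pairsB_pairwise_aux _ (PySem.List.pairwise_lt_enumerate seq 0))

-- bisect invariant: the result splits the sorted list at the first element > e
theorem pvBisectGo_spec (lst : List Int) (e : Int) (hs : lst.Pairwise (· ≤ ·)) :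
    ∀ fuel lo hi, hi - lo ≤ fuel → lo ≤ hi → hi ≤ lst.length →
    (∀ j, j < lo → lst.getD j 0 ≤ e) →
    (∀ j, hi ≤ j → j < lst.length → e < lst.getD j 0) →
    (∀ j, j < pvBisectGo lst e fuel lo hi → lst.getD j 0 ≤ e) ∧
    (∀ j, pvBisectGo lst e fuel lo hi ≤ j → j < lst.length → e < lst.getD j 0) ∧
    pvBisectGo lst e fuel lo hi ≤ lst.length := by
  have hmono : ∀ i j, i ≤ j → (hj : j < lst.length) → lst.getD i 0 ≤ lst.getD j 0 := by
    intro i j hij hj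
    rcases Nat.lt_or_ge i j with h | h
    · rw [lst.getD_eq_getElem 0 (lt_trans h hj), lst.getD_eq_getElem 0 hj]
      exact List.pairwise_iff_getElem.mp hs i j _ _ h
    · have : i = j := le_antisymm hij h
      subst this; rfl
  intro fuel
  induction fuel with
  | zero =>
    intro lo hi hfuel hlohi hhi hlo hhiP
    have : lo = hi := by omega
    subst this
    simp only [pvBisectGo]
    exact ⟨hlo, fun j hj hjl => hhiP j hj hjl, by omega⟩
  | succ fuel ih =>
    intro lo hi hfuel hlohi hhi hlo hhiP
    by_cases h : lo < hi
    · by_cases hle : lst.getD ((lo + hi) / 2) 0 ≤ e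
      · rw [show pvBisectGo lst e (fuel + 1) lo hi = pvBisectGo lst e fuel ((lo + hi) / 2 + 1) hi by
              simp only [pvBisectGo, if_pos h, if_pos hle]]
        refine ih _ _ (by omega) (by omega) hhi ?_ hhiP
        intro j hj
        rcases Nat.lt_or_ge j lo with h2 | h2
        · exact hlo j h2
        · have hmid : (lo + hi) / 2 < lst.length := by omega
          exact le_trans (hmono j ((lo + hi) / 2) (by omega) hmid) hle
      · rw [show pvBisectGo lst e (fuel + 1) lo hi = pvBisectGo lst e fuel lo ((lo + hi) / 2) by
              simp only [pvBisectGo, if_pos h, if_neg hle]]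
        refine ih _ _ (by omega) (by omega) (by omega) hlo ?_
        intro j hj hjlen
        rcases Nat.lt_or_ge j hi with h2 | h2
        · exact lt_of_lt_of_le (lt_of_not_ge hle) (hmono ((lo + hi) / 2) j hj hjlen)
        · exact hhiP j h2 hjlen
    · rw [show pvBisectGo lst e (fuel + 1) lo hi = lo by simp only [pvBisectGo, if_neg h]]
      exact ⟨hlo, fun j hj hjl => hhiP j (by omega) hjl, by omega⟩

theorem pvBisect_spec (lst : List Int) (e : Int) (hs : lst.Pairwise (· ≤ ·)) :
    ∀ lo hi, lo ≤ hi → hi ≤ lst.length →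
    (∀ j, j < lo → lst.getD j 0 ≤ e) →
    (∀ j, hi ≤ j → j < lst.length → e < lst.getD j 0) →
    (∀ j, j < pvBisect lst e lo hi → lst.getD j 0 ≤ e) ∧
    (∀ j, pvBisect lst e lo hi ≤ j → j < lst.length → e < lst.getD j 0) ∧
    pvBisect lst e lo hi ≤ lst.length := by
  intro lo hi hlohi hhi hlo hhiP
  exact pvBisectGo_spec lst e hs (hi - lo) lo hi (le_refl _) hlohi hhi hlo hhiP

-- A's inner scan: none iff no row from start on contains p
theorem pvFindAGo_none_iff (p : String) (seq : List (List String)) :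
    ∀ rem i, seq.length ≤ i + rem →
    (pvFindAGo p seq rem i = none ↔ ∀ j, i ≤ j → ∀ h : j < seq.length, p ∉ seq[j]) := by
  intro rem
  induction rem with
  | zero =>
    intro i hlen
    simp only [pvFindAGo, true_iff]
    intro j hj hjl
    omega
  | succ rem ih =>
    intro i hlen
    by_cases h : i < seq.length
    · by_cases hmem : p ∈ seq[i]
      · rw [show pvFindAGo p seq (rem + 1) i = some (i + 1) by
              simp only [pvFindAGo, dif_pos h, if_pos hmem]]
        simp only [reduceCtorEq, false_iff, not_forall]
        exact ⟨i, le_refl i, h, by simpa using hmem⟩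
      · rw [show pvFindAGo p seq (rem + 1) i = pvFindAGo p seq rem (i + 1) by
              simp only [pvFindAGo, dif_pos h, if_neg hmem]]
        rw [ih (i + 1) (by omega)]
        constructor
        · intro hall j hj hjl
          rcases Nat.lt_or_ge i j with h2 | h2
          · exact hall j h2 hjl
          · have : j = i := by omega
            subst this; exact hmem
        · intro hall j hj hjl
          exact hall j (by omega) hjl
    · rw [show pvFindAGo p seq (rem + 1) i = none by simp only [pvFindAGo, dif_neg h]]
      simp only [true_iff]
      intro j hj hjl
      omega

theorem pvFindA_none_iff (p : String) (seq : List (List String)) (start : Nat) :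
    pvFindA p seq start = none ↔ ∀ i, start ≤ i → ∀ h : i < seq.length, p ∉ seq[i] := by
  exact pvFindAGo_none_iff p seq (seq.length - start) start (by omega)

-- A's inner scan finds the FIRST matching row
theorem pvFindAGo_some_of (p : String) (seq : List (List String)) (t : Nat)
    (h2 : t < seq.length) (h3 : p ∈ seq[t]) :
    ∀ rem i, seq.length ≤ i + rem → i ≤ t →
    (∀ j, i ≤ j → j < t → ∀ hj : j < seq.length, p ∉ seq[j]) →
    pvFindAGo p seq rem i = some (t + 1) := by
  intro rem
  induction rem with
  | zero =>
    intro i hlen h1 h4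
    omega
  | succ rem ih =>
    intro i hlen h1 h4
    have h : i < seq.length := by omega
    by_cases hmem : p ∈ seq[i]
    · have : i = t := by
        by_contra hne
        exact h4 i (le_refl i) (by omega) h hmem
      subst this
      simp only [pvFindAGo, dif_pos h, if_pos hmem]
    · have hsi : i ≠ t := fun hc => hmem (hc ▸ h3)
      rw [show pvFindAGo p seq (rem + 1) i = pvFindAGo p seq rem (i + 1) by
            simp only [pvFindAGo, dif_pos h, if_neg hmem]]
      exact ih (i + 1) (by omega) (by omega) (fun j hj hji hjl => h4 j (by omega) hji hjl)

theorem pvFindA_some_of (p : String) (seq : List (List String)) (start i : Nat)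
    (h1 : start ≤ i) (h2 : i < seq.length) (h3 : p ∈ seq[i])
    (h4 : ∀ j, start ≤ j → j < i → ∀ hj : j < seq.length, p ∉ seq[j]) :
    pvFindA p seq start = some (i + 1) := by
  exact pvFindAGo_some_of p seq i h2 h3 (seq.length - start) start (by omega) h1 h4

-- the per-pattern-element bridge: the successor query equals A's forward scan
theorem step_bridge (seq : List (List String)) (p : String) (start : Nat) :
    (let lst := (pvPosB seq).getD p []
     let lo := pvBisect lst ((start : Int) - 1) 0 lst.length
     if lo = lst.length then none else some (lst.getD lo 0))
    = (pvFindA p seq start).map (fun s => (s : Int) - 1) := by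
  simp only []
  set lst := (pvPosB seq).getD p [] with hlst
  set e : Int := (start : Int) - 1 with he
  obtain ⟨hA, hB, hC⟩ := pvBisect_spec lst e (posB_sorted seq p) 0 lst.length (Nat.zero_le _) (le_refl _)
    (fun j hj => absurd hj (Nat.not_lt_zero j)) (fun j hj hjl => absurd hjl (by omega))
  set lo := pvBisect lst e 0 lst.length with hlo
  by_cases hend : lo = lst.length
  · rw [if_pos hend]
    have hnone : pvFindA p seq start = none := by
      rw [pvFindA_none_iff]
      intro i hi hil hmem
      have hx : (i : Int) ∈ lst := (posB_mem seq p i).mpr ⟨i, ⟨hil, hmem⟩, rfl⟩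
      obtain ⟨k, hk, hkv⟩ := List.getElem_of_mem hx
      have : lst.getD k 0 ≤ e := hA k (by omega)
      rw [lst.getD_eq_getElem 0 hk, hkv] at this
      omega
    rw [hnone]; rfl
  · rw [if_neg hend]
    have hlolen : lo < lst.length := lt_of_le_of_ne hC hend
    have hgt : e < lst.getD lo 0 := hB lo (le_refl lo) hlolen
    have hxmem : lst.getD lo 0 ∈ lst := by
      rw [lst.getD_eq_getElem 0 hlolen]; exact List.getElem_mem hlolen
    obtain ⟨i, ⟨hil, hmem⟩, hiv⟩ := (posB_mem seq p _).mp hxmem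
    have hstart : start ≤ i := by omega
    have hfirst : ∀ j, start ≤ j → j < i → ∀ hj : j < seq.length, p ∉ seq[j] := by
      intro j hj hji hjl hjm
      have hx : (j : Int) ∈ lst := (posB_mem seq p j).mpr ⟨j, ⟨hjl, hjm⟩, rfl⟩
      obtain ⟨k, hk, hkv⟩ := List.getElem_of_mem hx
      have hklo : lo ≤ k := by
        by_contra hc
        have := hA k (by omega)
        rw [lst.getD_eq_getElem 0 hk, hkv] at this
        omega
      have : lst.getD lo 0 ≤ lst.getD k 0 := by
        rcases Nat.lt_or_ge lo k with h2 | h2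
        · rw [lst.getD_eq_getElem 0 hlolen, lst.getD_eq_getElem 0 hk]
          exact List.pairwise_iff_getElem.mp (posB_sorted seq p) lo k _ _ h2
        · have : lo = k := by omega
          subst this; rfl
      rw [lst.getD_eq_getElem 0 hk, hkv] at this
      rw [lst.getD_eq_getElem 0 hlolen] at *
      omega
    rw [pvFindA_some_of p seq start i hstart hil hmem hfirst]
    show some (lst.getD lo 0) = some (((i + 1 : Nat) : Int) - 1)
    rw [Option.some_inj, ← hiv]
    push_cast
    ring

theorem go_bridge (seq : List (List String)) (pattern : List String) :
    ∀ start : Nat, pvGoB (pvPosB seq) pattern ((start : Int) - 1) = pvGoA pattern seq start := by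
  induction pattern with
  | nil => intro start; simp [pvGoB, pvGoA]
  | cons p ps ih =>
    intro start
    have hb := step_bridge seq p start
    simp only [] at hb
    rw [pvGoB, pvGoA]
    cases hf : pvFindA p seq start with
    | none =>
      rw [hf] at hb
      simp at hb
      simp [hb]
    | some s =>
      rw [hf] at hb
      by_cases hcond : pvBisect ((pvPosB seq).getD p []) ((start : Int) - 1) 0
          ((pvPosB seq).getD p []).length = ((pvPosB seq).getD p []).length
      · rw [if_pos hcond] at hb
        exact absurd hb (by simp)
      · rw [if_neg hcond] at hb
        rw [if_neg hcond]
        have hval : ((pvPosB seq).getD p []).getD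
            (pvBisect ((pvPosB seq).getD p []) ((start : Int) - 1) 0
              ((pvPosB seq).getD p []).length) 0 = ((s : Nat) : Int) - 1 :=
          Option.some_inj.mp hb
        rw [hval]
        exact ih s

-- ===== VERDICT (by name: the statement is the Claim_ definition above) =====
theorem pattern_occurs_and_end_index_spec : Claim_equal_pattern_occurs_and_end_index := by
  intro pattern seq_terms _
  unfold Spec_pattern_occurs_and_end_index pattern_occurs_and_end_index pattern_occurs_and_end_index_alt
  by_cases h : pattern = []
  · simp [h]
  · rw [if_neg h, if_neg h, show (-1 : Int) = ((0 : Nat) : Int) - 1 by simp,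
        go_bridge seq_terms pattern 0]
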